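-- pv_equiv track=rewrite | github.com/lnunno/advent-of-code-2016 | day02/bathroom.py | get_bathroom_code
-- ===== SOURCE A (Python) =====
-- num_pad = [
--     [1, 2, 3],
--     [4, 5, 6],
--     [7, 8, 9]
-- ]
--
-- def get_bathroom_code(lines):
--     x, y = (1, 1)
--     start_index = (x, y)
--     s = ''
--     for line in lines:
--         for char in line.strip():
--             if char == 'U':
--                 y = max(0, y-1)
--             elif char == 'D':
--                 y = min(2, y+1)
--             elif char == 'R':
--                 x = min(2, x+1)
--             elif char == 'L':
--                 x = max(0, x-1)
--             else:
--                 raise Exception('Invalid direction {}'.format(char))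
--         s += str(num_pad[y][x])
--     return s
-- ===== SOURCE B (Python) =====
-- _MOVES = {
--     1: {'U': 1, 'D': 4, 'L': 1, 'R': 2},
--     2: {'U': 2, 'D': 5, 'L': 1, 'R': 3},
--     3: {'U': 3, 'D': 6, 'L': 2, 'R': 3},
--     4: {'U': 1, 'D': 7, 'L': 4, 'R': 5},
--     5: {'U': 2, 'D': 8, 'L': 4, 'R': 6},
--     6: {'U': 3, 'D': 9, 'L': 5, 'R': 6},
--     7: {'U': 4, 'D': 7, 'L': 7, 'R': 8},
--     8: {'U': 5, 'D': 8, 'L': 7, 'R': 9},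
--     9: {'U': 6, 'D': 9, 'L': 8, 'R': 9},
-- }
--
-- def get_bathroom_code(lines):
--     key = 5
--     parts = []
--     for line in lines:
--         for char in line.strip():
--             row = _MOVES[key]
--             if char not in row:
--                 raise Exception('Invalid direction {}'.format(char))
--             key = row[char]
--         parts.append(str(key))
--     return ''.join(parts)
-- ===== Notes on version B (the rewrite author's own statement) =====
-- stated objective: simpler
-- what changed: Replaces the (x,y) coordinate pair with clamped min/max arithmetic and a 2-D pad lookup by a single current key and a precomputed transition table mapping each key and direction to the next key, with edge moves mapping to the same key.
import Mathlib
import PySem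

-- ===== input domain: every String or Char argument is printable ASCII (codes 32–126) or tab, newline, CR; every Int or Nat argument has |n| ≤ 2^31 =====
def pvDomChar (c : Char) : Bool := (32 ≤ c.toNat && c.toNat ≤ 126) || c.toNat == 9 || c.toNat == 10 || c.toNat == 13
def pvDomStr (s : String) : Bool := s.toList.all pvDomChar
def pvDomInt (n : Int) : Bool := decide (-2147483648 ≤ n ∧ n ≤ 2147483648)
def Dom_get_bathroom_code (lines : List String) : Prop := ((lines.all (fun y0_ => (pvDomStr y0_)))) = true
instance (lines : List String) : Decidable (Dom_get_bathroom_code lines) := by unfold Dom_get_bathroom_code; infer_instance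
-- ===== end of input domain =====

-- B replaces A's clamped (x,y) coordinate arithmetic and 2-D pad lookup by a single
-- current key stepped through a precomputed key×direction transition table (simpler).


-- ===== PORT A =====
def pvNumPad : List (List Int) := [[1, 2, 3], [4, 5, 6], [7, 8, 9]]

-- one move of A's inner loop on the (x, y) pair; the final else branch is Python's
-- 'raise Exception(...)' — those inputs are excluded by Pre_get_bathroom_code
def pvStepA (st : Int × Int) (c : Char) : Int × Int :=
  if c = 'U' then (st.1, max 0 (st.2 - 1))
  else if c = 'D' then (st.1, min 2 (st.2 + 1))
  else if c = 'R' then (min 2 (st.1 + 1), st.2)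
  else if c = 'L' then (max 0 (st.1 - 1), st.2)
  else st

-- one iteration of A's outer loop; the accumulated string is ported on code points
-- (exact: s += str(num_pad[y][x]) appends the digit's characters)
def pvLineA (acc : (Int × Int) × List Char) (line : String) : (Int × Int) × List Char :=
  let xy := (PySem.Str.strip line).toList.foldl pvStepA acc.1
  (xy, acc.2 ++ PySem.Int.toChars (PySem.List.pyGetD (PySem.List.pyGetD pvNumPad xy.2 []) xy.1 0))

def get_bathroom_code (lines : List String) : String :=
  String.ofList (lines.foldl pvLineA ((1, 1), [])).2

-- ===== PORT B =====
def pvMoves : PySem.Dict Int (PySem.Dict Char Int) :=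
  PySem.Dict.ofList [
    (1, PySem.Dict.ofList [('U', 1), ('D', 4), ('L', 1), ('R', 2)]),
    (2, PySem.Dict.ofList [('U', 2), ('D', 5), ('L', 1), ('R', 3)]),
    (3, PySem.Dict.ofList [('U', 3), ('D', 6), ('L', 2), ('R', 3)]),
    (4, PySem.Dict.ofList [('U', 1), ('D', 7), ('L', 4), ('R', 5)]),
    (5, PySem.Dict.ofList [('U', 2), ('D', 8), ('L', 4), ('R', 6)]),
    (6, PySem.Dict.ofList [('U', 3), ('D', 9), ('L', 5), ('R', 6)]),
    (7, PySem.Dict.ofList [('U', 4), ('D', 7), ('L', 7), ('R', 8)]),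
    (8, PySem.Dict.ofList [('U', 5), ('D', 8), ('L', 7), ('R', 9)]),
    (9, PySem.Dict.ofList [('U', 6), ('D', 9), ('L', 8), ('R', 9)])]

-- one move of B's inner loop; Source B raises on a char absent from the row, so the
-- 'key' default is never read on inputs admitted by Pre_get_bathroom_code
def pvStepB (key : Int) (c : Char) : Int :=
  let row := PySem.Dict.getD pvMoves key (PySem.Dict.ofList [])
  PySem.Dict.getD row c key

def pvLineB (acc : Int × List String) (line : String) : Int × List String :=
  let k := (PySem.Str.strip line).toList.foldl pvStepB acc.1
  (k, acc.2 ++ [PySem.Int.toStr k])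

def get_bathroom_code_alt (lines : List String) : String :=
  PySem.Str.join "" (lines.foldl pvLineB (5, [])).2

-- ===== PRECONDITION & SPEC =====
-- Pre_ excludes exactly the inputs on which A (and B) raise Exception('Invalid direction …'):
-- some stripped line contains a character other than U, D, L, R.
def Pre_get_bathroom_code (lines : List String) : Prop :=
  lines.all (fun line => (PySem.Str.strip line).toList.all
    (fun c => c == 'U' || c == 'D' || c == 'L' || c == 'R')) = true
instance (lines : List String) : Decidable (Pre_get_bathroom_code lines) := by
  unfold Pre_get_bathroom_code; infer_instance

def pvWitness_get_bathroom_code : List String := ["ULL", " DRR \t", ""]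

def Spec_get_bathroom_code (lines : List String) (out : String) : Prop := out = get_bathroom_code_alt lines
instance (lines : List String) (out : String) : Decidable (Spec_get_bathroom_code lines out) := by unfold Spec_get_bathroom_code; infer_instance

-- ===== CLAIM (what is proved, stated in full; the proofs are below) =====
def Claim_equal_get_bathroom_code : Prop := ∀ (lines : List String), Dom_get_bathroom_code lines → Pre_get_bathroom_code lines → Spec_get_bathroom_code lines (get_bathroom_code lines)

-- ===== LEMMAS AND PROOFS =====

-- the coordinate/key simulation invariant
def pvRel (xy : Int × Int) (key : Int) : Prop :=
  key = 3 * xy.2 + xy.1 + 1 ∧ 0 ≤ xy.1 ∧ xy.1 ≤ 2 ∧ 0 ≤ xy.2 ∧ xy.2 ≤ 2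

theorem pvStep_sim (xy : Int × Int) (key : Int) (c : Char)
    (hc : c = 'U' ∨ c = 'D' ∨ c = 'L' ∨ c = 'R') (h : pvRel xy key) :
    pvRel (pvStepA xy c) (pvStepB key c) := by
  obtain ⟨x, y⟩ := xy
  obtain ⟨hk, hx0, hx2, hy0, hy2⟩ := h
  subst hk
  interval_cases x <;> interval_cases y <;>
    rcases hc with rfl | rfl | rfl | rfl <;> (unfold pvRel; decide)

theorem pvFold_sim (cs : List Char) (xy : Int × Int) (key : Int)
    (hcs : ∀ c ∈ cs, c = 'U' ∨ c = 'D' ∨ c = 'L' ∨ c = 'R') (h : pvRel xy key) :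
    pvRel (cs.foldl pvStepA xy) (cs.foldl pvStepB key) := by
  induction cs generalizing xy key with
  | nil => simpa using h
  | cons c cs ih =>
    simp only [List.foldl_cons]
    apply ih
    · exact fun d hd => hcs d (List.mem_cons_of_mem _ hd)
    · exact pvStep_sim xy key c (hcs c (List.mem_cons_self)) h

theorem pvDigit_eq (xy : Int × Int) (key : Int) (h : pvRel xy key) :
    PySem.Int.toChars (PySem.List.pyGetD (PySem.List.pyGetD pvNumPad xy.2 []) xy.1 0)
      = (PySem.Int.toStr key).toList := by
  obtain ⟨x, y⟩ := xy
  obtain ⟨hk, hx0, hx2, hy0, hy2⟩ := h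
  subst hk
  interval_cases x <;> interval_cases y <;> decide

theorem pvJoin_flatten (l : List (List Char)) : PySem.Chars.join [] l = l.flatten := by
  induction l with
  | nil => rfl
  | cons a l ih =>
    cases l with
    | nil => simp [PySem.Chars.join, List.intercalate]
    | cons b t =>
      simp only [PySem.Chars.join, List.intercalate] at ih ⊢
      rw [show List.intersperse ([] : List Char) (a :: b :: t)
            = a :: [] :: List.intersperse [] (b :: t) by simp [List.intersperse]]
      simp only [List.flatten_cons] at ih ⊢
      simp [ih]

theorem pvOuter_sim (lines : List String)
    (hpre : ∀ line ∈ lines, ∀ c ∈ (PySem.Str.strip line).toList,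
      c = 'U' ∨ c = 'D' ∨ c = 'L' ∨ c = 'R')
    (xy : Int × Int) (key : Int) (h : pvRel xy key)
    (sA : List Char) (ps : List String) (hs : sA = (ps.map String.toList).flatten) :
    (lines.foldl pvLineA (xy, sA)).2
      = (((lines.foldl pvLineB (key, ps)).2).map String.toList).flatten := by
  induction lines generalizing xy key sA ps with
  | nil => simpa using hs
  | cons line rest ih =>
    simp only [List.foldl_cons]
    have hline := fun c hc => hpre line (List.mem_cons_self) c hc
    have hrest := fun l hl => hpre l (List.mem_cons_of_mem _ hl)
    have hfold := pvFold_sim (PySem.Str.strip line).toList xy key hline h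
    apply ih hrest _ _ hfold
    rw [pvDigit_eq _ _ hfold, hs]
    simp [PySem.Int.toList_toStr]

-- ===== VERDICT (by name: the statement is the Claim_ definition above) =====
theorem get_bathroom_code_spec : Claim_equal_get_bathroom_code := by
  intro lines _ hpre
  unfold Pre_get_bathroom_code at hpre
  simp only [List.all_eq_true, Bool.or_eq_true, beq_iff_eq] at hpre
  have hpre' : ∀ line ∈ lines, ∀ c ∈ (PySem.Str.strip line).toList,
      c = 'U' ∨ c = 'D' ∨ c = 'L' ∨ c = 'R' := by
    intro l hl c hc
    rcases hpre l hl c hc with ((h | h) | h) | h <;> simp [h]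
  unfold Spec_get_bathroom_code get_bathroom_code get_bathroom_code_alt
  rw [pvOuter_sim lines hpre' (1, 1) 5 (by unfold pvRel; decide) [] [] rfl]
  simp [PySem.Str.join, pvJoin_flatten, String.ofList]
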